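-- pv_equiv track=rewrite | github.com/wesleygomersall/bioinfo-tools | translate_mRNA.py | reading_frame
-- ===== SOURCE A (Python) =====
-- def reading_frame(mRNA_seq: str) -> list:
--     """ Given an mRNA sequence, finds reading frame for the sequence by looking for the start codon 'ATG', returning a list of the 3 base codons. """
--     frame = list()
--     reading = False
--     base1, base2, base3 = 'N', 'N', 'N'
--     index = 0
--     inframe = 0
--     while True:
--
--         base1 = base2
--         base2 = base3
--         base3 = mRNA_seq[index]
--         current_codon = base1 + base2 + base3
--
--         if reading:
--             inframe += 1
--             if inframe == 3:
--                 frame.append(current_codon)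
--                 inframe = 0
--
--         if not reading and current_codon.upper() in ["ATG", "AUG"]:
--             reading = True
--             frame.append(current_codon)
--
--         index += 1
--         if index == len(mRNA_seq):
--             break
--
--     return(frame)
-- ===== SOURCE B (Python) =====
-- def reading_frame(mRNA_seq: str) -> list:
--     """ Given an mRNA sequence, finds reading frame for the sequence by looking for the start codon 'ATG', returning a list of the 3 base codons. """
--     up = mRNA_seq.upper()
--     hits = [k for k in (up.find("ATG"), up.find("AUG")) if k != -1]
--     if not hits:
--         return []
--     start = min(hits)
--     return [mRNA_seq[k:k + 3] for k in range(start, len(mRNA_seq) - 2, 3)]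
-- ===== Notes on version B (the rewrite author's own statement) =====
-- stated objective: simpler
-- what changed: Replaced A's character-by-character sliding-window state machine (reading flag, inframe counter, three rolling base variables) by the idiomatic two-phase form: str.find of each start codon on the upper-cased sequence picks the earliest start index, then a slice comprehension with step 3 extracts the codons.
import Mathlib
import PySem

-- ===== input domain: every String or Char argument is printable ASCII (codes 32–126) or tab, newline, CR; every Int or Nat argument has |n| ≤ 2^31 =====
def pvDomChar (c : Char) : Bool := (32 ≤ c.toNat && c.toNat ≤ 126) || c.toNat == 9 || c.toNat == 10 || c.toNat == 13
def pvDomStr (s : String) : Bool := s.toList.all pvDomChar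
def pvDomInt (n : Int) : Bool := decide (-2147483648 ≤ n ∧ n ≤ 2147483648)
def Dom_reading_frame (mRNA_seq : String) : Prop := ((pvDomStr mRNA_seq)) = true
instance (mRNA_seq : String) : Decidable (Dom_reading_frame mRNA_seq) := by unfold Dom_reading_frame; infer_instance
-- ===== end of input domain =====

-- B replaces A's one-pass sliding-window state machine by str.find of the start codon plus
-- direct slice extraction of the codons (objective: simpler/idiomatic). Pre_ excludes only
-- the empty string, on which A raises IndexError (B returns [] there).

-- ===== PORT A =====
-- one loop iteration of A's while-loop: state = (frame, reading, inframe, base2, base3)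
def raStep (st : List String × Bool × Nat × Char × Char) (c : Char) :
    List String × Bool × Nat × Char × Char :=
  match st with
  | (frame, reading, inframe, b2, b3) =>
    -- base1 = b2, base2 = b3, base3 = c
    let codon := String.ofList [b2, b3, c]
    let inframe' := if reading then inframe + 1 else inframe
    let frame' := if reading && (inframe' == 3) then frame ++ [codon] else frame
    let inframe'' := if reading && (inframe' == 3) then 0 else inframe'
    let startHit := !reading && (["ATG", "AUG"] : List String).contains (PySem.Str.upper codon)
    let frame'' := if startHit then frame' ++ [codon] else frame'
    let reading' := if startHit then true else reading
    (frame'', reading', inframe'', b3, c)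

def reading_frame (mRNA_seq : String) : List String :=
  (mRNA_seq.toList.foldl raStep ([], false, 0, 'N', 'N')).1

-- ===== PORT B =====
def reading_frame_alt (mRNA_seq : String) : List String :=
  let up := PySem.Str.upper mRNA_seq
  let hits := [PySem.Str.find up "ATG", PySem.Str.find up "AUG"].filter (fun k => k != -1)
  match PySem.List.min? hits (fun x => x) with
  | none => []
  | some start =>
      (PySem.List.pyRange start (PySem.Str.len mRNA_seq - 2) 3).map
        (fun k => PySem.Str.slice mRNA_seq (some k) (some (k + 3)))

-- ===== PRECONDITION & SPEC =====
-- Pre_ excludes only the empty string, on which A's mRNA_seq[0] raises IndexError.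
def Pre_reading_frame (mRNA_seq : String) : Prop := mRNA_seq ≠ ""
instance (mRNA_seq : String) : Decidable (Pre_reading_frame mRNA_seq) := by
  unfold Pre_reading_frame; infer_instance
def pvWitness_reading_frame : String := "ATGAAAG"

def Spec_reading_frame (mRNA_seq : String) (out : List String) : Prop :=
  out = reading_frame_alt mRNA_seq
instance (mRNA_seq : String) (out : List String) : Decidable (Spec_reading_frame mRNA_seq out) := by
  unfold Spec_reading_frame; infer_instance

-- ===== CLAIM (what is proved, stated in full; the proofs are below) =====
def Claim_equal_reading_frame : Prop := ∀ (mRNA_seq : String), Dom_reading_frame mRNA_seq →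
  Pre_reading_frame mRNA_seq → Spec_reading_frame mRNA_seq (reading_frame mRNA_seq)

-- ===== LEMMAS AND PROOFS =====

-- does the (raw-case) triple a,b,c spell a start codon after upper-casing?
def m3 (a b c : Char) : Bool :=
  decide (PySem.Chars.upper [a, b, c] = ['A', 'T', 'G'] ∨ PySem.Chars.upper [a, b, c] = ['A', 'U', 'G'])

-- consecutive full triples of a char list, as strings
def chunks3 : List Char → List String
  | a :: b :: c :: r => String.ofList [a, b, c] :: chunks3 r
  | _ => []

-- A's loop after `reading` became true (state: last two chars p q, counter k)
def emitA : Char → Char → List Char → Nat → List String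
  | _, _, [], _ => []
  | p, q, c :: t, k =>
    if k + 1 = 3 then String.ofList [p, q, c] :: emitA q c t 0 else emitA q c t (k + 1)

-- A's loop while `reading` is false
def scanA : Char → Char → List Char → List String
  | _, _, [] => []
  | p, q, c :: t => if m3 p q c then String.ofList [p, q, c] :: emitA q c t 0 else scanA q c t

-- window-free restatement: scan the triples of the list itself
def scanS : List Char → List String
  | a :: b :: c :: r => if m3 a b c then chunks3 (a :: b :: c :: r) else scanS (b :: c :: r)
  | _ => []

-- index of the first start-codon triple
def start? : List Char → Option Nat
  | a :: b :: c :: r => if m3 a b c then some 0 else (start? (b :: c :: r)).map (· + 1)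
  | _ => none

theorem ofList_eq_iff (l m : List Char) : (String.ofList l = String.ofList m) ↔ l = m := by
  constructor
  · intro h; have := congrArg String.toList h; simpa using this
  · intro h; rw [h]

theorem cond_eq (p q c : Char) :
    ((["ATG", "AUG"] : List String).contains (PySem.Str.upper (String.ofList [p, q, c]))) = m3 p q c := by
  have h : PySem.Str.upper (String.ofList [p, q, c]) = String.ofList (PySem.Chars.upper [p, q, c]) := by
    simp [PySem.Str.upper]
  have h1 : ("ATG" : String) = String.ofList ['A', 'T', 'G'] := by decide
  have h2 : ("AUG" : String) = String.ofList ['A', 'U', 'G'] := by decide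
  rw [h, h1, h2]
  simp only [List.contains_cons, List.contains_nil, Bool.or_false, m3]
  by_cases e1 : PySem.Chars.upper [p, q, c] = ['A', 'T', 'G'] <;>
    by_cases e2 : PySem.Chars.upper [p, q, c] = ['A', 'U', 'G'] <;>
      simp [e1, e2] <;>
      (rw [h1, h2]
       exact ⟨fun hh => e1 ((ofList_eq_iff _ _).mp hh), fun hh => e2 ((ofList_eq_iff _ _).mp hh)⟩)

theorem raStep_reading (frame : List String) (k : Nat) (p q c : Char) :
    raStep (frame, true, k, p, q) c =
      (if k + 1 = 3 then frame ++ [String.ofList [p, q, c]] else frame, true,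
        if k + 1 = 3 then 0 else k + 1, q, c) := by
  by_cases h : k + 1 = 3 <;> simp [raStep, h] <;> omega

theorem raStep_not_reading (frame : List String) (p q c : Char) :
    raStep (frame, false, 0, p, q) c =
      (if m3 p q c then frame ++ [String.ofList [p, q, c]] else frame, m3 p q c, 0, q, c) := by
  simp only [raStep]
  rw [cond_eq]
  by_cases h : m3 p q c = true <;> simp [h]

theorem fold_reading : ∀ (t : List Char) (frame : List String) (k : Nat) (p q : Char),
    (t.foldl raStep (frame, true, k, p, q)).1 = frame ++ emitA p q t k
  | [], frame, k, p, q => by simp [emitA]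
  | c :: t, frame, k, p, q => by
    rw [List.foldl_cons, raStep_reading]
    by_cases h : k + 1 = 3 <;> simp [h, emitA, fold_reading t]

theorem fold_scan : ∀ (t : List Char) (frame : List String) (p q : Char),
    (t.foldl raStep (frame, false, 0, p, q)).1 = frame ++ scanA p q t
  | [], frame, p, q => by simp [scanA]
  | c :: t, frame, p, q => by
    rw [List.foldl_cons, raStep_not_reading]
    by_cases h : m3 p q c = true
    · simp [h, scanA, fold_reading t]
    · simp only [h, Bool.false_eq_true, if_false]
      simp [scanA, h, fold_scan t]

theorem emit_chunks : ∀ (t : List Char) (p q : Char), emitA p q t 0 = chunks3 t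
  | [], _, _ => by simp [emitA, chunks3]
  | [a], _, _ => by simp [emitA, chunks3]
  | [a, b], _, _ => by simp [emitA, chunks3]
  | a :: b :: c :: r, p, q => by simp [emitA, chunks3, emit_chunks r]

theorem scanA_scanS : ∀ (t : List Char) (p q : Char), scanA p q t = scanS (p :: q :: t)
  | [], p, q => by simp [scanA, scanS]
  | c :: t, p, q => by
    by_cases h : m3 p q c = true <;> simp [scanA, scanS, h, emit_chunks, scanA_scanS t, chunks3]

theorem m3_N (b c : Char) : m3 'N' b c = false := by
  have h : PySem.Chars.upperChar 'N' = 'N' := by decide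
  simp [m3, PySem.Chars.upper, h]

theorem scanS_NN (l : List Char) : scanS ('N' :: 'N' :: l) = scanS l := by
  match l with
  | [] => simp [scanS]
  | [c] => simp [scanS, m3_N]
  | c :: d :: t => simp [scanS, m3_N]

theorem A_eq_scanS (s : String) : reading_frame s = scanS s.toList := by
  unfold reading_frame
  rw [fold_scan, scanA_scanS, scanS_NN]
  simp

theorem scanS_start : ∀ (l : List Char),
    scanS l = match start? l with
      | none => []
      | some i => chunks3 (l.drop i)
  | [] => by simp [scanS, start?]
  | [a] => by simp [scanS, start?]
  | [a, b] => by simp [scanS, start?]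
  | a :: b :: c :: r => by
    by_cases h : m3 a b c = true
    · simp [scanS, start?, h]
    · simp only [scanS, start?, h, Bool.false_eq_true, if_false]
      rw [scanS_start (b :: c :: r)]
      cases hs : start? (b :: c :: r) with
      | none => simp
      | some i => simp

theorem m3_iff_prefix (a b c : Char) (r : List Char) :
    (['A', 'T', 'G'] <+: PySem.Chars.upper (a :: b :: c :: r) ∨
      ['A', 'U', 'G'] <+: PySem.Chars.upper (a :: b :: c :: r)) ↔ m3 a b c = true := by
  simp [PySem.Chars.upper, m3, List.cons_prefix_cons]
  constructor <;> rintro (⟨h1, h2, h3⟩ | ⟨h1, h2, h3⟩) <;>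
    first
      | exact Or.inl ⟨h1.symm, h2.symm, h3.symm⟩
      | exact Or.inr ⟨h1.symm, h2.symm, h3.symm⟩

theorem start?_none_occ : ∀ (l : List Char), start? l = none → ∀ j : Nat,
    ¬ (['A', 'T', 'G'] <+: (PySem.Chars.upper l).drop j ∨
       ['A', 'U', 'G'] <+: (PySem.Chars.upper l).drop j)
  | [], _, j => by
    intro h
    rcases h with h | h <;> · have := h.length_le; simp [PySem.Chars.upper] at this; all_goals omega
  | [a], _, j => by
    intro h
    rcases h with h | h <;> · have := h.length_le; simp [PySem.Chars.upper] at this; all_goals omega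
  | [a, b], _, j => by
    intro h
    rcases h with h | h <;> · have := h.length_le; simp [PySem.Chars.upper] at this; all_goals omega
  | a :: b :: c :: r, hn, j => by
    simp only [start?] at hn
    by_cases hm : m3 a b c = true
    · simp [hm] at hn
    · simp only [hm, Bool.false_eq_true, if_false, Option.map_eq_none_iff] at hn
      cases j with
      | zero =>
        simpa [List.drop_zero, m3_iff_prefix, hm] using (fun h => hm ((m3_iff_prefix a b c r).mp h))
      | succ j' =>
        have hrec := start?_none_occ (b :: c :: r) hn j'
        simpa [PySem.Chars.upper] using hrec

theorem start?_some_occ : ∀ (l : List Char) (i : Nat), start? l = some i →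
    ((['A', 'T', 'G'] <+: (PySem.Chars.upper l).drop i ∨
      ['A', 'U', 'G'] <+: (PySem.Chars.upper l).drop i) ∧
     ∀ j < i, ¬ (['A', 'T', 'G'] <+: (PySem.Chars.upper l).drop j ∨
                 ['A', 'U', 'G'] <+: (PySem.Chars.upper l).drop j))
  | [], i, h => by simp [start?] at h
  | [a], i, h => by simp [start?] at h
  | [a, b], i, h => by simp [start?] at h
  | a :: b :: c :: r, i, h => by
    simp only [start?] at h
    by_cases hm : m3 a b c = true
    · simp only [hm, if_true, Option.some_inj] at h
      subst h
      exact ⟨(m3_iff_prefix a b c r).mpr hm, by omega⟩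
    · simp only [hm, Bool.false_eq_true, if_false, Option.map_eq_some_iff] at h
      obtain ⟨i', hi', rfl⟩ := h
      obtain ⟨hocc, hmin⟩ := start?_some_occ (b :: c :: r) i' hi'
      constructor
      · simpa [PySem.Chars.upper] using hocc
      · intro j hj
        cases j with
        | zero =>
          intro hcon
          exact hm ((m3_iff_prefix a b c r).mp (by simpa [List.drop_zero] using hcon))
        | succ j' =>
          have := hmin j' (by omega)
          simpa [PySem.Chars.upper] using this

theorem chunks3_short (t : List Char) (h : t.length < 3) : chunks3 t = [] := by
  match t with
  | [] => rfl
  | [a] => rfl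
  | [a, b] => rfl
  | a :: b :: c :: r => simp at h; omega

theorem chunks3_cons3 (t : List Char) (h : 3 ≤ t.length) :
    chunks3 t = String.ofList (t.take 3) :: chunks3 (t.drop 3) := by
  match t with
  | a :: b :: c :: r => simp [chunks3]
  | [] | [a] | [a, b] => simp at h

theorem pyRange3_nil (a b : Int) (h : b ≤ a) : PySem.List.pyRange a b 3 = [] := by
  rw [PySem.List.pyRange_of_pos a b (by norm_num)]
  rw [if_neg (by omega)]
  simp

theorem pyRange3_cons (a b : Int) (h : a < b) :
    PySem.List.pyRange a b 3 = a :: PySem.List.pyRange (a + 3) b 3 := by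
  rw [PySem.List.pyRange_of_pos a b (by norm_num), PySem.List.pyRange_of_pos (a + 3) b (by norm_num)]
  rw [if_pos h]
  by_cases h3 : a + 3 < b
  · rw [if_pos h3]
    have : ((b - a + 3 - 1) / 3).toNat = ((b - (a + 3) + 3 - 1) / 3).toNat + 1 := by omega
    rw [this, List.range_succ_eq_map]
    simp only [List.map_cons, List.map_map]
    refine congrArg₂ _ (by push_cast; ring) ?_
    apply List.map_congr_left
    intro x _
    simp only [Function.comp_apply]
    push_cast
    ring
  · rw [if_neg h3]
    have : ((b - a + 3 - 1) / 3).toNat = 1 := by omega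
    rw [this]
    simp

theorem slice3_eq (s : String) (i : Nat) :
    PySem.Str.slice s (some (i : Int)) (some ((i : Int) + 3)) =
      String.ofList ((s.toList.drop i).take 3) := by
  apply String.toList_inj.mp
  rw [PySem.Str.toList_slice]
  rw [show ((i : Int) + 3) = ((i : Int) + ((3 : Nat) : Int)) from by norm_num]
  rw [PySem.Chars.slice_eq_listSlice, PySem.List.slice_natCast_add s.toList i 3]
  simp

theorem mapSlices (s : String) : ∀ (n i : Nat), s.toList.length - i ≤ n →
    ((PySem.List.pyRange (i : Int) (PySem.Str.len s - 2) 3).map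
        (fun k => PySem.Str.slice s (some k) (some (k + 3)))) = chunks3 (s.toList.drop i) := by
  have hL : s.toList.length = s.length := by simp
  intro n
  induction n with
  | zero =>
    intro i hb
    rw [pyRange3_nil _ _ (by simp [PySem.Str.len_eq]; omega)]
    rw [chunks3_short _ (by simp; omega)]
    simp
  | succ n ih =>
    intro i hb
    by_cases hlt : (i : Int) < PySem.Str.len s - 2
    · have hlen : i + 3 ≤ s.toList.length := by
        simp [PySem.Str.len_eq] at hlt; omega
      rw [pyRange3_cons _ _ hlt, List.map_cons, slice3_eq]
      rw [chunks3_cons3 _ (by simp; omega)]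
      have h3 : ((i : Int) + 3) = ((i + 3 : Nat) : Int) := by push_cast; ring
      rw [h3, ih (i + 3) (by omega)]
      rw [List.drop_drop]
    · rw [pyRange3_nil _ _ (by omega)]
      rw [chunks3_short _ (by simp [PySem.Str.len_eq] at hlt; simp; omega)]
      simp

-- ===== VERDICT (by name: the statement is the Claim_ definition above) =====
theorem find_facts (U sub : List Char) :
    (PySem.Chars.find U sub = -1 ∧ ∀ j : Nat, ¬ sub <+: U.drop j) ∨
    (0 ≤ PySem.Chars.find U sub ∧ sub <+: U.drop (PySem.Chars.find U sub).toNat ∧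
      ∀ j : Nat, j < (PySem.Chars.find U sub).toNat → ¬ sub <+: U.drop j) := by
  by_cases h : PySem.Chars.find U sub = -1
  · left
    refine ⟨h, fun j hj => ?_⟩
    have hin : PySem.Chars.isIn sub U = true := (PySem.Chars.exists_prefix_drop_iff_isIn sub U).mp ⟨j, hj⟩
    have hinf := (PySem.Chars.isIn_iff_infix sub U).mp hin
    exact ((PySem.Chars.find_eq_neg_one_iff U sub).mp h) hinf
  · right
    have h0 : 0 ≤ PySem.Chars.find U sub := by
      have := PySem.Chars.neg_one_le_find U sub
      omega
    obtain ⟨hp, hmin⟩ := PySem.Chars.find_spec h0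
    exact ⟨h0, hp, hmin⟩

theorem reading_frame_spec : Claim_equal_reading_frame := by
  intro s _ _
  unfold Spec_reading_frame reading_frame_alt
  simp only []
  rw [A_eq_scanS, scanS_start]
  have hATG : ("ATG" : String).toList = ['A', 'T', 'G'] := by decide
  have hAUG : ("AUG" : String).toList = ['A', 'U', 'G'] := by decide
  have hf1 : PySem.Str.find (PySem.Str.upper s) "ATG" =
      PySem.Chars.find (PySem.Chars.upper s.toList) ['A', 'T', 'G'] := by
    rw [PySem.Str.find_eq, PySem.Str.toList_upper, hATG]
  have hf2 : PySem.Str.find (PySem.Str.upper s) "AUG" =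
      PySem.Chars.find (PySem.Chars.upper s.toList) ['A', 'U', 'G'] := by
    rw [PySem.Str.find_eq, PySem.Str.toList_upper, hAUG]
  set U := PySem.Chars.upper s.toList with hUdef
  set f1 := PySem.Chars.find U ['A', 'T', 'G'] with hf1def
  set f2 := PySem.Chars.find U ['A', 'U', 'G'] with hf2def
  rcases find_facts U ['A', 'T', 'G'] with ⟨h1, no1⟩ | ⟨h1, hp1, hm1⟩ <;>
    rcases find_facts U ['A', 'U', 'G'] with ⟨h2, no2⟩ | ⟨h2, hp2, hm2⟩
  all_goals rw [hf1, hf2]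
  · -- no occurrence at all
    cases hs : start? s.toList with
    | none =>
      rw [show f1 = -1 from h1, show f2 = -1 from h2]
      simp [List.filter, PySem.List.min?]
    | some i =>
      obtain ⟨hocc, _⟩ := start?_some_occ s.toList i hs
      rcases hocc with h | h
      · exact absurd h (no1 i)
      · exact absurd h (no2 i)
  · -- only AUG occurs
    cases hs : start? s.toList with
    | none =>
      have := start?_none_occ s.toList hs f2.toNat
      exact absurd (Or.inr hp2) this
    | some i =>
      obtain ⟨hocc, hmin⟩ := start?_some_occ s.toList i hs
      have hocc2 : ['A', 'U', 'G'] <+: U.drop i := by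
        rcases hocc with h | h
        · exact absurd h (no1 i)
        · exact h
      have hi : f2.toNat = i := by
        rcases Nat.lt_trichotomy f2.toNat i with hlt | he | hgt
        · exact absurd (Or.inr hp2) (hmin _ hlt)
        · exact he
        · exact absurd hocc2 (hm2 _ hgt)
      have hf2i : f2 = (i : Int) := by omega
      rw [show f1 = -1 from h1, hf2i]
      have hne : ((i : Int) != -1) = true := by
        simp only [bne_iff_ne, ne_eq]
        omega
      simp only [List.filter, hne, decide_eq_true_eq]
      norm_num
      rw [PySem.List.min?_id_cons]
      simp only [List.foldl_nil]
      exact (mapSlices s s.toList.length i (by omega)).symm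
  · -- only ATG occurs
    cases hs : start? s.toList with
    | none =>
      have := start?_none_occ s.toList hs f1.toNat
      exact absurd (Or.inl hp1) this
    | some i =>
      obtain ⟨hocc, hmin⟩ := start?_some_occ s.toList i hs
      have hocc1 : ['A', 'T', 'G'] <+: U.drop i := by
        rcases hocc with h | h
        · exact h
        · exact absurd h (no2 i)
      have hi : f1.toNat = i := by
        rcases Nat.lt_trichotomy f1.toNat i with hlt | he | hgt
        · exact absurd (Or.inl hp1) (hmin _ hlt)
        · exact he
        · exact absurd hocc1 (hm1 _ hgt)
      have hf1i : f1 = (i : Int) := by omega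
      rw [show f2 = -1 from h2, hf1i]
      have hne : ((i : Int) != -1) = true := by
        simp only [bne_iff_ne, ne_eq]
        omega
      simp only [List.filter, hne, decide_eq_true_eq]
      norm_num
      rw [PySem.List.min?_id_cons]
      simp only [List.foldl_nil]
      exact (mapSlices s s.toList.length i (by omega)).symm
  · -- both occur
    cases hs : start? s.toList with
    | none =>
      have := start?_none_occ s.toList hs f1.toNat
      exact absurd (Or.inl hp1) this
    | some i =>
      obtain ⟨hocc, hmin⟩ := start?_some_occ s.toList i hs
      have hmle : min f1 f2 = (i : Int) := by
        have h0m : 0 ≤ min f1 f2 := le_min h1 h2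
        have hoccm : (['A', 'T', 'G'] <+: U.drop (min f1 f2).toNat ∨
            ['A', 'U', 'G'] <+: U.drop (min f1 f2).toNat) := by
          rcases min_choice f1 f2 with hm | hm <;> rw [hm]
          · exact Or.inl hp1
          · exact Or.inr hp2
        have hile : i ≤ (min f1 f2).toNat := by
          by_contra hc
          exact (hmin _ (by omega)) hoccm
        have hle2 : (min f1 f2).toNat ≤ i := by
          rcases hocc with h | h
          · have : f1.toNat ≤ i := by
              by_contra hc
              exact (hm1 _ (by omega)) h
            have : min f1 f2 ≤ f1 := min_le_left _ _
            omega
          · have : f2.toNat ≤ i := by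
              by_contra hc
              exact (hm2 _ (by omega)) h
            have : min f1 f2 ≤ f2 := min_le_right _ _
            omega
        omega
      have hne1 : (f1 != -1) = true := by
        simp only [bne_iff_ne, ne_eq]
        omega
      have hne2 : (f2 != -1) = true := by
        simp only [bne_iff_ne, ne_eq]
        omega
      simp only [List.filter, hne1, hne2]
      rw [PySem.List.min?_id_cons]
      simp only [List.foldl_cons, List.foldl_nil]
      rw [hmle]
      exact (mapSlices s s.toList.length i (by omega)).symm
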